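-- pv_equiv track=rewrite | github.com/brianjwalters/entity-extraction-service | src/api/routes/unified_patterns.py | categorize_entity_type
-- ===== SOURCE A (Python) =====
-- def categorize_entity_type(entity_type: str) -> str:
--     """
--     Categorize entity type into a high-level category.
--     Reuses logic from entity_types.py but simplified.
--     """
--     entity_type_upper = entity_type.upper()
--
--     # Courts and Judicial
--     if any(term in entity_type_upper for term in ["COURT", "JUDGE", "JUSTICE", "MAGISTRATE"]):
--         return "Courts and Judicial"
--
--     # Case Citations
--     if "CITATION" in entity_type_upper or "PARALLEL" in entity_type_upper:
--         return "Citations"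
--
--     # Legal Parties
--     if any(term in entity_type_upper for term in ["PARTY", "PLAINTIFF", "DEFENDANT", "APPELLANT", "APPELLEE", "PETITIONER", "RESPONDENT"]):
--         return "Legal Parties"
--
--     # Legal Professionals
--     if any(term in entity_type_upper for term in ["ATTORNEY", "COUNSEL", "LAWYER", "LAW_FIRM"]):
--         return "Legal Professionals"
--
--     # Temporal
--     if any(term in entity_type_upper for term in ["DATE", "TIME", "DEADLINE", "PERIOD"]):
--         return "Temporal"
--
--     # Financial
--     if any(term in entity_type_upper for term in ["AMOUNT", "MONEY", "CURRENCY", "FINANCIAL"]):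
--         return "Financial"
--
--     # Statutory
--     if any(term in entity_type_upper for term in ["STATUTE", "CODE", "REGULATION", "USC", "CFR"]):
--         return "Statutory"
--
--     # Legal Concepts
--     if any(term in entity_type_upper for term in ["DOCTRINE", "STANDARD", "TEST", "CONCEPT", "CAUSE"]):
--         return "Legal Concepts"
--
--     return "Miscellaneous"
-- ===== SOURCE B (Python) =====
-- # B: instead of an early-return priority chain, scan a flat (priority, term, category)
-- # list once and keep the argmin priority among all matching terms; no grouping, no early exit.
-- RULES = [
--     ("Courts and Judicial", ["COURT", "JUDGE", "JUSTICE", "MAGISTRATE"]),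
--     ("Citations", ["CITATION", "PARALLEL"]),
--     ("Legal Parties", ["PARTY", "PLAINTIFF", "DEFENDANT", "APPELLANT", "APPELLEE", "PETITIONER", "RESPONDENT"]),
--     ("Legal Professionals", ["ATTORNEY", "COUNSEL", "LAWYER", "LAW_FIRM"]),
--     ("Temporal", ["DATE", "TIME", "DEADLINE", "PERIOD"]),
--     ("Financial", ["AMOUNT", "MONEY", "CURRENCY", "FINANCIAL"]),
--     ("Statutory", ["STATUTE", "CODE", "REGULATION", "USC", "CFR"]),
--     ("Legal Concepts", ["DOCTRINE", "STANDARD", "TEST", "CONCEPT", "CAUSE"]),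
-- ]
--
-- TERM_RULES = [(p, t, c) for p, (c, terms) in enumerate(RULES) for t in terms]
--
-- def categorize_entity_type(entity_type: str) -> str:
--     u = entity_type.upper()
--     best_p, best_c = len(RULES), "Miscellaneous"
--     for p, t, c in TERM_RULES:
--         if t in u and p < best_p:
--             best_p, best_c = p, c
--     return best_c
-- ===== Notes on version B (the rewrite author's own statement) =====
-- stated objective: alternative
-- what changed: Replaced the early-return priority if-chain over grouped term lists by a single argmin pass: one flat (priority, term, category) list is scanned completely with a running-minimum accumulator (no grouping, no early exit), returning the category of minimal matching priority.
import Mathlib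
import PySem

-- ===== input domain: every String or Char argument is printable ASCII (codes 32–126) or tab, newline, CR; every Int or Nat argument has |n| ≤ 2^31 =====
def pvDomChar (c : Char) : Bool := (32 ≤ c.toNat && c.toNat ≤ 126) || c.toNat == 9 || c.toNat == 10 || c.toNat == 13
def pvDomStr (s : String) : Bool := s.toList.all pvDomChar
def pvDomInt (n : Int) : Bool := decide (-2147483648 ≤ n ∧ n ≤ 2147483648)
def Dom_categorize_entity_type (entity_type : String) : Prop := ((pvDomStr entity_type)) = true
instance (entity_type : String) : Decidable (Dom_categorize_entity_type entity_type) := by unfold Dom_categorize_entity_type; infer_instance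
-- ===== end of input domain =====

-- B replaces A's early-return priority if-chain by one argmin pass over a flat
-- (priority, term, category) list with a running-minimum accumulator; objective: simpler.

-- ===== PORT A =====
def categorize_entity_type (entity_type : String) : String :=
  let entity_type_upper := PySem.Str.upper entity_type
  if ["COURT", "JUDGE", "JUSTICE", "MAGISTRATE"].any (fun term => PySem.Str.isIn term entity_type_upper) then
    "Courts and Judicial"
  else if PySem.Str.isIn "CITATION" entity_type_upper || PySem.Str.isIn "PARALLEL" entity_type_upper then
    "Citations"
  else if ["PARTY", "PLAINTIFF", "DEFENDANT", "APPELLANT", "APPELLEE", "PETITIONER", "RESPONDENT"].any (fun term => PySem.Str.isIn term entity_type_upper) then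
    "Legal Parties"
  else if ["ATTORNEY", "COUNSEL", "LAWYER", "LAW_FIRM"].any (fun term => PySem.Str.isIn term entity_type_upper) then
    "Legal Professionals"
  else if ["DATE", "TIME", "DEADLINE", "PERIOD"].any (fun term => PySem.Str.isIn term entity_type_upper) then
    "Temporal"
  else if ["AMOUNT", "MONEY", "CURRENCY", "FINANCIAL"].any (fun term => PySem.Str.isIn term entity_type_upper) then
    "Financial"
  else if ["STATUTE", "CODE", "REGULATION", "USC", "CFR"].any (fun term => PySem.Str.isIn term entity_type_upper) then
    "Statutory"
  else if ["DOCTRINE", "STANDARD", "TEST", "CONCEPT", "CAUSE"].any (fun term => PySem.Str.isIn term entity_type_upper) then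
    "Legal Concepts"
  else
    "Miscellaneous"

-- ===== PORT B =====
-- flat term list, built group by group as Source B's comprehension does
def pvGroup (p : Int) (c : String) (ts : List String) : List (Int × String × String) :=
  ts.map (fun t => (p, t, c))

def pvTermRules : List (Int × String × String) :=
  pvGroup 0 "Courts and Judicial" ["COURT", "JUDGE", "JUSTICE", "MAGISTRATE"] ++
  pvGroup 1 "Citations" ["CITATION", "PARALLEL"] ++
  pvGroup 2 "Legal Parties" ["PARTY", "PLAINTIFF", "DEFENDANT", "APPELLANT", "APPELLEE", "PETITIONER", "RESPONDENT"] ++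
  pvGroup 3 "Legal Professionals" ["ATTORNEY", "COUNSEL", "LAWYER", "LAW_FIRM"] ++
  pvGroup 4 "Temporal" ["DATE", "TIME", "DEADLINE", "PERIOD"] ++
  pvGroup 5 "Financial" ["AMOUNT", "MONEY", "CURRENCY", "FINANCIAL"] ++
  pvGroup 6 "Statutory" ["STATUTE", "CODE", "REGULATION", "USC", "CFR"] ++
  pvGroup 7 "Legal Concepts" ["DOCTRINE", "STANDARD", "TEST", "CONCEPT", "CAUSE"]

-- the loop body: keep the match with strictly smaller priority (running minimum)
def pvStep (u : String) (b : Int × String) (x : Int × String × String) : Int × String :=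
  if PySem.Str.isIn x.2.1 u = true ∧ x.1 < b.1 then (x.1, x.2.2) else b

def categorize_entity_type_alt (entity_type : String) : String :=
  let u := PySem.Str.upper entity_type
  (pvTermRules.foldl (pvStep u) (8, "Miscellaneous")).2

-- ===== PRECONDITION & SPEC =====
def Spec_categorize_entity_type (entity_type : String) (out : String) : Prop := out = categorize_entity_type_alt entity_type
instance (entity_type : String) (out : String) : Decidable (Spec_categorize_entity_type entity_type out) := by unfold Spec_categorize_entity_type; infer_instance

-- ===== CLAIM (what is proved, stated in full; the proofs are below) =====
def Claim_equal_categorize_entity_type : Prop := ∀ (entity_type : String), Dom_categorize_entity_type entity_type → Spec_categorize_entity_type entity_type (categorize_entity_type entity_type)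

-- ===== LEMMAS AND PROOFS =====

-- the grouped view of the flat term list (proof-side only)
def pvGs : List (Int × String × List String) :=
  [ (0, "Courts and Judicial", ["COURT", "JUDGE", "JUSTICE", "MAGISTRATE"]),
    (1, "Citations", ["CITATION", "PARALLEL"]),
    (2, "Legal Parties", ["PARTY", "PLAINTIFF", "DEFENDANT", "APPELLANT", "APPELLEE", "PETITIONER", "RESPONDENT"]),
    (3, "Legal Professionals", ["ATTORNEY", "COUNSEL", "LAWYER", "LAW_FIRM"]),
    (4, "Temporal", ["DATE", "TIME", "DEADLINE", "PERIOD"]),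
    (5, "Financial", ["AMOUNT", "MONEY", "CURRENCY", "FINANCIAL"]),
    (6, "Statutory", ["STATUTE", "CODE", "REGULATION", "USC", "CFR"]),
    (7, "Legal Concepts", ["DOCTRINE", "STANDARD", "TEST", "CONCEPT", "CAUSE"]) ]

-- first-match reading of the grouped rules (proof-side characterisation of the fold)
def pvChainP (u : String) (b : Int × String) : List (Int × String × List String) → Int × String
  | [] => b
  | (p, c, ts) :: rest =>
      if (ts.any fun t => PySem.Str.isIn t u) = true then (p, c) else pvChainP u b rest

-- once the accumulator's priority is ≤ the group's, the whole group is skipped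
theorem pvFold_skip (u : String) (p : Int) (c : String) (ts : List String) (b : Int × String)
    (h : b.1 ≤ p) : (pvGroup p c ts).foldl (pvStep u) b = b := by
  induction ts with
  | nil => rfl
  | cons t ts ih =>
      simp only [pvGroup, List.map_cons, List.foldl_cons] at *
      have hstep : pvStep u b (p, t, c) = b := by
        rw [pvStep, if_neg]; rintro ⟨_, hlt⟩; exact absurd hlt (not_lt.mpr h)
      rw [hstep]; exact ih

-- a group of priority below the accumulator's wins iff one of its terms matches
theorem pvFold_hit (u : String) (p : Int) (c : String) (ts : List String) (b : Int × String)
    (h : p < b.1) :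
    (pvGroup p c ts).foldl (pvStep u) b =
      if (ts.any fun t => PySem.Str.isIn t u) = true then (p, c) else b := by
  induction ts generalizing b with
  | nil => simp only [pvGroup, List.map_nil, List.foldl_nil, List.any_nil]; rw [if_neg]; simp
  | cons t ts ih =>
      simp only [pvGroup, List.map_cons, List.foldl_cons] at *
      by_cases hm : PySem.Str.isIn t u = true
      · have hstep : pvStep u b (p, t, c) = (p, c) := by rw [pvStep, if_pos ⟨hm, h⟩]
        have hsk := pvFold_skip u p c ts (p, c) le_rfl
        simp only [pvGroup] at hsk
        rw [hstep, hsk, List.any_cons, hm, Bool.true_or, if_pos rfl]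
      · have hstep : pvStep u b (p, t, c) = b := by
          rw [pvStep, if_neg]; rintro ⟨h1, _⟩; exact hm h1
        rw [Bool.not_eq_true] at hm
        rw [hstep, ih b h, List.any_cons, hm, Bool.false_or]

-- if every remaining group's priority is at least the accumulator's, nothing changes
theorem pvFoldAll_skip (u : String) (gs : List (Int × String × List String)) (b : Int × String)
    (h : ∀ g ∈ gs, b.1 ≤ g.1) :
    List.foldl (pvStep u) b (gs.flatMap fun g => pvGroup g.1 g.2.1 g.2.2) = b := by
  induction gs with
  | nil => rfl
  | cons g gs ih =>
      rw [List.flatMap_cons, List.foldl_append,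
        pvFold_skip u g.1 g.2.1 g.2.2 b (h g (List.mem_cons_self))]
      exact ih (fun g' hg' => h g' (List.mem_cons_of_mem _ hg'))

-- the running-minimum fold over the flattened groups computes the first-match chain
theorem pvFold_flat (u : String) (gs : List (Int × String × List String)) (b : Int × String)
    (hb : ∀ g ∈ gs, g.1 < b.1) (hp : gs.Pairwise (fun g g' => g.1 < g'.1)) :
    List.foldl (pvStep u) b (gs.flatMap fun g => pvGroup g.1 g.2.1 g.2.2) = pvChainP u b gs := by
  induction gs with
  | nil => rfl
  | cons g gs ih =>
      obtain ⟨p, c, ts⟩ := g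
      rcases List.pairwise_cons.mp hp with ⟨hhead, htail⟩
      rw [List.flatMap_cons, List.foldl_append,
        pvFold_hit u p c ts b (hb _ List.mem_cons_self)]
      by_cases hm : (ts.any fun t => PySem.Str.isIn t u) = true
      · rw [if_pos hm]
        rw [pvFoldAll_skip u gs (p, c) (fun g' hg' => le_of_lt (hhead g' hg'))]
        simp only [pvChainP]; rw [if_pos hm]
      · rw [if_neg hm, ih (fun g' hg' => hb g' (List.mem_cons_of_mem _ hg')) htail]
        simp only [pvChainP]; rw [if_neg hm]

-- ===== VERDICT (by name: the statement is the Claim_ definition above) =====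
set_option maxHeartbeats 1000000 in
theorem categorize_entity_type_spec : Claim_equal_categorize_entity_type := by
  intro s _
  unfold Spec_categorize_entity_type categorize_entity_type categorize_entity_type_alt
  have hrw : pvTermRules = pvGs.flatMap (fun g => pvGroup g.1 g.2.1 g.2.2) := rfl
  simp only []
  rw [hrw, pvFold_flat (PySem.Str.upper s) pvGs (8, "Miscellaneous") (by decide) (by decide)]
  simp only [pvGs, pvChainP, List.any_cons, List.any_nil, Bool.or_false]
  split_ifs <;> rfl
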